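-- pv_equiv track=rewrite | github.com/AnetaStoycheva/Programming0_HackBulgaria | Week 4/winter.py | winter_is_coming
-- ===== SOURCE A (Python) =====
-- def winter_is_coming(seasons):
--
-- 	# if len(seasons) < 5:
-- 	# 	return False
--
-- 	past_seasons = 0
--
-- 	for a in seasons:
-- 		if a == 'winter':
-- 			past_seasons = 0 # ako mina prez winter - zapo4vam otnovo da broq ot 0la
--
-- 		else:
-- 			past_seasons += 1
--
-- 	# return past_seasons >= 5 --> tozi red pravi sledva6tite 4 izli6ni :D :D
--
-- 	if past_seasons < 5:
-- 		return False
-- 	else: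
-- 		return True
-- ===== SOURCE B (Python) =====
-- def winter_is_coming(seasons):
--     count = 0
--     for a in reversed(seasons):
--         if a == 'winter':
--             break
--         count += 1
--     return count >= 5
-- ===== Notes on version B (the rewrite author's own statement) =====
-- stated objective: alternative
-- what changed: B scans the list in reverse and stops at the first 'winter' found from the end, instead of A's full forward pass that resets a counter on every 'winter'.
import Mathlib
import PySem

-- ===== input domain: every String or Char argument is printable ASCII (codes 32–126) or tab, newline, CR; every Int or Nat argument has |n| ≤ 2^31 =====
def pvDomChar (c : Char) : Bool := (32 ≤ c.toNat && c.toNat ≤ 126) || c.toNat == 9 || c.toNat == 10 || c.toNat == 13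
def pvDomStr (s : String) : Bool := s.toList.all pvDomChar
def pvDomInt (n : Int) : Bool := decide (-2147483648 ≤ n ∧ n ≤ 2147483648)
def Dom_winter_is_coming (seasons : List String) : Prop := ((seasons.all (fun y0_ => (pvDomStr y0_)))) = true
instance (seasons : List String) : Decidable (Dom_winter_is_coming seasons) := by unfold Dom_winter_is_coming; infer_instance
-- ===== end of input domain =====

-- ===== PORT A =====
-- Honest one-line header: B is a reverse scan stopping at the last 'winter' (alternative decomposition, same asymptotic cost).
def winter_is_coming (seasons : List String) : Bool :=
  let past := seasons.foldl (fun past_seasons a => if a = "winter" then 0 else past_seasons + 1) (0 : Int)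
  if past < 5 then false else true

-- ===== PORT B =====
-- count trailing non-winter elements, walking the reversed list and breaking at 'winter'
def pvCountRev : List String → Int
  | [] => 0
  | a :: rest => if a = "winter" then 0 else pvCountRev rest + 1

def winter_is_coming_alt (seasons : List String) : Bool :=
  decide (5 ≤ pvCountRev seasons.reverse)

-- ===== PRECONDITION & SPEC =====
def Spec_winter_is_coming (seasons : List String) (out : Bool) : Prop := out = winter_is_coming_alt seasons
instance (seasons : List String) (out : Bool) : Decidable (Spec_winter_is_coming seasons out) := by unfold Spec_winter_is_coming; infer_instance

-- ===== CLAIM (what is proved, stated in full; the proofs are below) =====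
def Claim_equal_winter_is_coming : Prop := ∀ (seasons : List String), Dom_winter_is_coming seasons → Spec_winter_is_coming seasons (winter_is_coming seasons)

-- ===== LEMMAS AND PROOFS =====

-- ===== VERDICT (by name: the statement is the Claim_ definition above) =====
-- A's forward fold computes the trailing-non-winter count when a 'winter' occurs, else c + that count.
theorem pv_fold_eq (l : List String) : ∀ c : Int,
    l.foldl (fun past_seasons a => if a = "winter" then 0 else past_seasons + 1) c
      = (if "winter" ∈ l then pvCountRev l.reverse else c + pvCountRev l.reverse) := by
  induction l using List.reverseRecOn with
  | nil => intro c; simp [pvCountRev]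
  | append_singleton l x ih =>
    intro c
    rw [List.foldl_append]
    simp only [List.foldl_cons, List.foldl_nil, List.reverse_append, List.reverse_singleton,
      List.singleton_append, pvCountRev, List.mem_append, List.mem_singleton, ih]
    by_cases hx : x = "winter" <;> by_cases hm : "winter" ∈ l <;>
      simp [hx, hm, eq_comm (a := "winter")] <;> ring

theorem winter_is_coming_spec : Claim_equal_winter_is_coming := by
  intro seasons _
  unfold Spec_winter_is_coming winter_is_coming winter_is_coming_alt
  rw [pv_fold_eq]
  by_cases hm : "winter" ∈ seasons <;> simp [hm] <;>
    rcases lt_or_ge (pvCountRev seasons.reverse) 5 with h | h <;> simp [h]
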